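-- pv_equiv track=rewrite | github.com/anaconda/percy | percy/render/recipe_parser.py | _str_to_stack_path
-- ===== SOURCE A (Python) =====
-- from typing import Any, Callable, Final, Mapping, NamedTuple, Optional, Union
--
-- _StrStack = list[str]
--
-- _ROOT_NODE_VALUE: Final[str] = "/"
--
-- def _str_to_stack_path(path: str) -> _StrStack:
--     """
--     Takes a JSON-patch path as a string and return a path as a stack of
--     strings.
--
--     String paths are used by callers, stacks are used internally.
--
--     For example:
--         "/foo/bar/baz" -> ["baz", "bar", "foo", "/"]
--     :param path: Path to deconstruct into a stack
--     :return: Path, described as a stack of strings.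
--     """
--     # TODO: validate the path starts with `/` (root)
--
--     # `PurePath` could be used here, but isn't for performance gains.
--     # TODO reduce 3 (O)n operations to 1 O(n) operation
--
--     # Wipe the trailing `/`, if provided. It doesn't have meaning here;
--     # only the `root` path is tracked.
--     if path[-1] == _ROOT_NODE_VALUE:
--         path = path[:-1]
--     parts = path.split("/")
--     # Replace empty strings with `/` for compatibility in other functions.
--     for i in range(0, len(parts)):
--         if parts[i] == "":
--             parts[i] = "/"
--     return parts[::-1]
-- ===== SOURCE B (Python) =====
-- def _str_to_stack_path(path):
--     # Single left-to-right scan instead of split + replace-loop + reverse slice.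
--     if path[-1] == "/":
--         path = path[:-1]
--     result = []
--     buf = []
--     for ch in path:
--         if ch == "/":
--             result.append("".join(buf) if buf else "/")
--             buf = []
--         else:
--             buf.append(ch)
--     result.append("".join(buf) if buf else "/")
--     result.reverse()
--     return result
-- ===== Notes on version B (the rewrite author's own statement) =====
-- stated objective: alternative
-- what changed: Replaces the three passes (split on '/', an index loop replacing empty parts by '/', and a [::-1] reversal slice) by one character scan that builds each segment in a buffer, emits '/' for empty segments inline, and reverses the collected list once.
import Mathlib
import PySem

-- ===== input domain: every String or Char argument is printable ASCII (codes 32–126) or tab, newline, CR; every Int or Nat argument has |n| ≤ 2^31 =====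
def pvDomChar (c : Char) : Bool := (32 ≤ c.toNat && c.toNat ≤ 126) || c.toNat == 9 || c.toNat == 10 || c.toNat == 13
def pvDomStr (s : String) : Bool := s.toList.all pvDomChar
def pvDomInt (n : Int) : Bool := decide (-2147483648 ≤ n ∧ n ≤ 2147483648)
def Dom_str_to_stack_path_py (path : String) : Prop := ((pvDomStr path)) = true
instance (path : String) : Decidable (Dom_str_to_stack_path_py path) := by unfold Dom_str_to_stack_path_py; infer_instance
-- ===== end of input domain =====

-- B does one left-to-right character scan with a segment buffer instead of A's
-- split / replace-loop / reversal slice; same return value on every non-empty path.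

-- ===== PORT A =====
-- A: strip one trailing '/', split on '/', replace "" parts by "/" in an index loop, return parts[::-1].
def str_to_stack_path_py (path : String) : List String :=
  -- if path[-1] == "/": path = path[:-1]
  let path := if PySem.Str.pyGet? path (-1) == some '/'
              then PySem.Str.slice path none (some (-1)) else path
  -- parts = path.split("/")   (split on chars, each part made a String — exact for "/" separator)
  let parts := (PySem.Chars.splitOn path.toList ['/']).map String.ofList
  -- for i in range(0, len(parts)): if parts[i] == "": parts[i] = "/"
  let parts := (PySem.List.pyRange 0 (parts.length : Int) 1).foldl
      (fun ps i => if PySem.List.pyGetD ps i "" == "" then PySem.List.pySetD ps i "/" else ps) parts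
  -- return parts[::-1]
  (PySem.List.slice? parts none none (-1)).getD []

-- ===== PORT B =====
-- segment emitted at each '/': the buffer's content, or "/" if the buffer is empty
def pvSeg (buf : List Char) : String := if buf.isEmpty then "/" else String.ofList buf

def str_to_stack_path_py_alt (path : String) : List String :=
  -- if path[-1] == "/": path = path[:-1]
  let path := if PySem.Str.pyGet? path (-1) == some '/'
              then PySem.Str.slice path none (some (-1)) else path
  -- one scan: buf accumulates the current segment, result collects finished segments
  let st := path.toList.foldl
      (fun (st : List Char × List String) c =>
        if c == '/' then ([], st.2 ++ [pvSeg st.1]) else (st.1 ++ [c], st.2))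
      ([], [])
  -- result.append(final segment); result.reverse()
  (st.2 ++ [pvSeg st.1]).reverse

-- ===== PRECONDITION & SPEC =====
-- Pre_ excludes only the empty string, on which A's path[-1] raises IndexError.
def Pre_str_to_stack_path_py (path : String) : Prop := path ≠ ""
instance (path : String) : Decidable (Pre_str_to_stack_path_py path) := by
  unfold Pre_str_to_stack_path_py; infer_instance
def pvWitness_str_to_stack_path_py : String := "/foo/bar"

def Spec_str_to_stack_path_py (path : String) (out : List String) : Prop := out = str_to_stack_path_py_alt path
instance (path : String) (out : List String) : Decidable (Spec_str_to_stack_path_py path out) := by unfold Spec_str_to_stack_path_py; infer_instance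

-- ===== CLAIM (what is proved, stated in full; the proofs are below) =====
def Claim_equal_str_to_stack_path_py : Prop := ∀ (path : String), Dom_str_to_stack_path_py path → Pre_str_to_stack_path_py path → Spec_str_to_stack_path_py path (str_to_stack_path_py path)

-- ===== LEMMAS AND PROOFS =====

-- the segments of buf ++ l, split at '/', empty segments rendered as "/"
def pvSegs : List Char → List Char → List String
  | [], buf => [pvSeg buf]
  | c :: rest, buf => if c == '/' then pvSeg buf :: pvSegs rest [] else pvSegs rest (buf ++ [c])

-- A's split+replace, as one map over the split pieces
def pvG (p : List Char) : String := if String.ofList p == "" then "/" else String.ofList p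

theorem pvG_eq_seg (p : List Char) : pvG p = pvSeg p := by
  cases p <;> simp [pvG, pvSeg]

theorem pv_go_eq (fuel : Nat) : ∀ (l cur : List Char) (acc : List (List Char)),
    l.length < fuel →
    (PySem.Chars.splitOn.go ['/'] fuel l cur acc).map pvG
      = (acc.map pvG).reverse ++ pvSegs l cur.reverse := by
  induction fuel with
  | zero => intro l cur acc h; omega
  | succ fuel ih =>
    intro l cur acc h
    cases l with
    | nil =>
      rw [PySem.Chars.splitOn.go.eq_def]
      simp [pvSegs, pvG_eq_seg]
    | cons c rest =>
      rw [PySem.Chars.splitOn.go.eq_def]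
      dsimp only
      by_cases hc : c = '/'
      · subst hc
        rw [if_pos (by simp [List.isPrefixOf])]
        rw [show List.drop (['/'].length) ('/' :: rest) = rest from rfl]
        rw [ih rest [] (cur.reverse :: acc) (by simpa using h)]
        simp [pvSegs, pvG_eq_seg]
      · rw [if_neg (by simp [List.isPrefixOf]; exact fun e => hc e.symm)]
        rw [ih rest (c :: cur) acc (by simpa using h)]
        simp [pvSegs, hc]

theorem pv_scan_eq : ∀ (l buf : List Char) (res : List String),
    (l.foldl (fun (st : List Char × List String) c =>
        if c == '/' then ([], st.2 ++ [pvSeg st.1]) else (st.1 ++ [c], st.2)) (buf, res)).2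
      ++ [pvSeg (l.foldl (fun (st : List Char × List String) c =>
        if c == '/' then ([], st.2 ++ [pvSeg st.1]) else (st.1 ++ [c], st.2)) (buf, res)).1]
      = res ++ pvSegs l buf := by
  intro l
  induction l with
  | nil => intro buf res; simp [pvSegs]
  | cons c rest ih =>
    intro buf res
    simp only [List.foldl_cons]
    by_cases hc : c = '/'
    · subst hc
      rw [if_pos (by rfl)]
      rw [ih [] (res ++ [pvSeg buf])]
      simp [pvSegs]
    · rw [if_neg (by simp [hc])]
      rw [ih (buf ++ [c]) res]
      simp [pvSegs, hc]

-- A's index loop over any index list below the length of an appended prefix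
theorem pv_loop_append (is : List Nat) : ∀ (zs : List String) (y : String),
    (∀ i ∈ is, i < zs.length) →
    is.foldl (fun ps k => if ps.getD k "" == "" then ps.set k "/" else ps) (zs ++ [y])
      = is.foldl (fun ps k => if ps.getD k "" == "" then ps.set k "/" else ps) zs ++ [y] := by
  induction is with
  | nil => intro zs y _; rfl
  | cons i is ih =>
    intro zs y h
    have hi : i < zs.length := h i (by simp)
    have hget : (zs ++ [y]).getD i "" = zs.getD i "" := by
      rw [List.getD_eq_getElem?_getD, List.getElem?_append_left hi,
          List.getD_eq_getElem?_getD]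
    have hset : (zs ++ [y]).set i "/" = zs.set i "/" ++ [y] := by
      rw [List.set_append, if_pos hi]
    simp only [List.foldl_cons, hget, hset]
    split_ifs with hy
    · exact ih _ y (fun j hj => by
        simpa [List.length_set] using h j (List.mem_cons_of_mem _ hj))
    · exact ih zs y (fun j hj => h j (List.mem_cons_of_mem _ hj))

theorem pv_loop_eq_map (xs : List String) :
    (List.range xs.length).foldl
        (fun ps k => if ps.getD k "" == "" then ps.set k "/" else ps) xs
      = xs.map (fun x => if x == "" then "/" else x) := by
  induction xs using List.reverseRecOn with
  | nil => rfl
  | append_singleton ys y ih =>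
    rw [List.length_append, List.length_cons, List.length_nil, List.range_succ,
        List.foldl_append]
    rw [pv_loop_append _ ys y (by intro i hi; simpa using List.mem_range.mp hi), ih]
    simp only [List.foldl_cons, List.foldl_nil]
    have hget : (ys.map (fun x => if x == "" then "/" else x) ++ [y]).getD (ys.length) ""
        = y := by
      rw [List.getD_eq_getElem?_getD, List.getElem?_append_right (by simp)]
      simp
    rw [hget]
    by_cases hy : y = ""
    · subst hy
      rw [if_pos (by rfl), List.set_append]
      simp [List.map_append]
    · rw [if_neg (by simp [hy])]
      simp [List.map_append, hy]

-- the pyRange foldl of the port is the List.range foldl above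
theorem pv_loop_pyRange (xs : List String) :
    (PySem.List.pyRange 0 (xs.length : Int) 1).foldl
        (fun ps i => if PySem.List.pyGetD ps i "" == "" then PySem.List.pySetD ps i "/" else ps) xs
      = (List.range xs.length).foldl
        (fun ps k => if ps.getD k "" == "" then ps.set k "/" else ps) xs := by
  rw [PySem.List.pyRange_zero_natCast, List.foldl_map]
  simp [PySem.List.pyGetD_natCast, PySem.List.pySetD_natCast]

-- ===== VERDICT (by name: the statement is the Claim_ definition above) =====
theorem str_to_stack_path_py_spec : Claim_equal_str_to_stack_path_py := by
  intro path _ _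
  unfold Spec_str_to_stack_path_py str_to_stack_path_py str_to_stack_path_py_alt
  dsimp only
  generalize (if PySem.Str.pyGet? path (-1) == some '/'
              then PySem.Str.slice path none (some (-1)) else path) = s
  rw [pv_loop_pyRange, pv_loop_eq_map, PySem.List.slice?_none_none_neg_one,
      Option.getD_some, List.map_map]
  rw [show ((fun x => if x == "" then "/" else x) ∘ String.ofList) = pvG from by
        funext p; simp [pvG, Function.comp]]
  apply congrArg
  rw [pv_scan_eq s.toList [] []]
  rw [show PySem.Chars.splitOn s.toList ['/']
        = PySem.Chars.splitOn.go ['/'] (s.toList.length + 1) s.toList [] [] from rfl]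
  rw [pv_go_eq (s.toList.length + 1) s.toList [] [] (by omega)]
  simp
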